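-- pv_equiv track=rewrite | github.com/JCarlosLucio/hack-assembler | coder.py | handle_variables
-- ===== SOURCE A (Python) =====
-- def handle_variables(lines: list[str], symbol_table: dict[str, int]) -> dict[str, int]:
--     """Add variables (a instructions that aren't default symbols or labels) to symbol_table
--
--     Args:
--         lines (list[str]): clean lines without labels and with variables to be handled
--         symbol_table (dict[str, int]): the symbol table where variables will be added
--
--     Returns:
--         dict[str, int]: the symbol table with variables added
--     """
--     # 16 is the start of memory space for variables from language specs
--     variable_mem_pos = 16
--
--     for line in lines:
--         if line.startswith("@"):
--             a_instruction = line[1:]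
--
--             if not a_instruction.isdigit() and not (a_instruction in symbol_table):
--                 symbol_table[a_instruction] = variable_mem_pos
--                 variable_mem_pos += 1
--
--     return symbol_table
-- ===== SOURCE B (Python) =====
-- def handle_variables(lines: list[str], symbol_table: dict[str, int]) -> dict[str, int]:
--     """Two-pass version: first collect new variable names in first-occurrence
--     order, then assign memory positions with enumerate(start=16)."""
--     seen = set()
--     new_vars = []
--     for line in lines:
--         if line.startswith("@"):
--             name = line[1:]
--             if not name.isdigit() and name not in symbol_table and name not in seen:
--                 seen.add(name)
--                 new_vars.append(name)
--     for pos, name in enumerate(new_vars, 16):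
--         symbol_table[name] = pos
--     return symbol_table
-- ===== Notes on version B (the rewrite author's own statement) =====
-- stated objective: alternative
-- what changed: Single fused loop that mutates the table while tracking the next free position is split into two passes: collect new variable names (deduped by a seen set) and then assign positions via enumerate(new_vars, 16).
import Mathlib
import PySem

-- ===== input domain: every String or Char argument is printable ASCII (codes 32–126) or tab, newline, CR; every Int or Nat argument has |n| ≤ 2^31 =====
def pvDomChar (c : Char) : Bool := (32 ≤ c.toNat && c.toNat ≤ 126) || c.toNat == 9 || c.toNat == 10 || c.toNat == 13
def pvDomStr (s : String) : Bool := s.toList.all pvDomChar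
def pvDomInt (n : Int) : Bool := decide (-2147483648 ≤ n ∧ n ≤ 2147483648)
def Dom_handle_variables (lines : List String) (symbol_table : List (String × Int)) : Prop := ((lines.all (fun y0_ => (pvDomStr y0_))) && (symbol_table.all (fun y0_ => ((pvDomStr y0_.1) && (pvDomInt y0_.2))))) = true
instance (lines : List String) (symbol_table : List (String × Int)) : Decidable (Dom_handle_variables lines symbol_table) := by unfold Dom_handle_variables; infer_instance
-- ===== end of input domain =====

-- B replaces A's single fused loop (mutate table + bump position counter) by two passes:
-- collect new variable names deduped by a seen set, then assign positions via enumerate(start=16).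
-- Both A and B mutate the symbol_table dict in place in Python (the same insertions); the
-- equivalence proved here is about the returned association list.

-- ===== PORT A =====
def handle_variables (lines : List String) (symbol_table : List (String × Int)) : List (String × Int) :=
  (lines.foldl
    (fun (st : PySem.Dict String Int × Int) line =>
      if PySem.Str.startswith line "@" then
        let a_instruction := PySem.Str.slice line (some 1) none
        if PySem.Str.strIsdigit a_instruction = false ∧ st.1.contains a_instruction = false then
          (st.1.insert a_instruction st.2, st.2 + 1)
        else st
      else st)
    (⟨symbol_table⟩, 16)).1.items

-- ===== PORT B =====
def handle_variables_alt (lines : List String) (symbol_table : List (String × Int)) : List (String × Int) :=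
  let st : PySem.Dict String Int := ⟨symbol_table⟩
  let firstPass := lines.foldl
    (fun (acc : PySem.Set String × List String) line =>
      if PySem.Str.startswith line "@" then
        let name := PySem.Str.slice line (some 1) none
        if PySem.Str.strIsdigit name = false ∧ st.contains name = false ∧
            PySem.Set.contains acc.1 name = false then
          (PySem.Set.add acc.1 name, acc.2 ++ [name])
        else acc
      else acc)
    (PySem.Set.empty, [])
  ((PySem.List.enumerate firstPass.2 16).foldl
      (fun (d : PySem.Dict String Int) p => d.insert p.2 p.1) st).items

-- ===== PRECONDITION & SPEC =====
def Spec_handle_variables (lines : List String) (symbol_table : List (String × Int)) (out : List (String × Int)) : Prop := out = handle_variables_alt lines symbol_table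
instance (lines : List String) (symbol_table : List (String × Int)) (out : List (String × Int)) : Decidable (Spec_handle_variables lines symbol_table out) := by unfold Spec_handle_variables; infer_instance

-- ===== CLAIM (what is proved, stated in full; the proofs are below) =====
def Claim_equal_handle_variables : Prop := ∀ (lines : List String) (symbol_table : List (String × Int)), Dom_handle_variables lines symbol_table → Spec_handle_variables lines symbol_table (handle_variables lines symbol_table)

-- ===== LEMMAS AND PROOFS =====

-- entries (v₀, p), (v₁, p+1), … — the block of rows both programs append to the table
def pvEnt : List String → Int → List (String × Int)
  | [], _ => []
  | v :: vs, p => (v, p) :: pvEnt vs (p + 1)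

-- the names A's loop (equivalently B's first pass) adds, given the fixed table d0 and names already seen
def pvCollect (d0 : PySem.Dict String Int) : List String → List String → List String
  | [], _ => []
  | line :: ls, seen =>
    if PySem.Str.startswith line "@" then
      let a := PySem.Str.slice line (some 1) none
      if PySem.Str.strIsdigit a = false ∧ d0.contains a = false ∧
          PySem.Set.contains seen a = false then
        a :: pvCollect d0 ls (seen ++ [a])
      else pvCollect d0 ls seen
    else pvCollect d0 ls seen

theorem pvSetContains_false (s : List String) (a : String) :
    PySem.Set.contains s a = false ↔ a ∉ s := by
  simp [PySem.Set.contains]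

theorem pvEnt_append (vs : List String) (a : String) (p : Int) :
    pvEnt (vs ++ [a]) p = pvEnt vs p ++ [(a, p + vs.length)] := by
  induction vs generalizing p with
  | nil => simp [pvEnt]
  | cons v vs ih =>
    simp only [List.cons_append, pvEnt, ih, List.length_cons]
    have : p + 1 + (vs.length : Int) = p + ((vs.length : Int) + 1) := by ring
    rw [this]
    push_cast
    rfl

theorem pvContains_append (l1 l2 : List (String × Int)) (a : String) :
    (⟨l1 ++ l2⟩ : PySem.Dict String Int).contains a
      = ((⟨l1⟩ : PySem.Dict String Int).contains a || (⟨l2⟩ : PySem.Dict String Int).contains a) := by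
  simp [PySem.Dict.contains, List.any_append]

theorem pvContains_ent (vs : List String) (p : Int) (a : String) :
    (⟨pvEnt vs p⟩ : PySem.Dict String Int).contains a = PySem.Set.contains vs a := by
  induction vs generalizing p with
  | nil => simp [pvEnt, PySem.Dict.contains, PySem.Set.contains]
  | cons v vs ih =>
    have := ih (p + 1)
    simp only [pvEnt, PySem.Dict.contains, PySem.Set.contains, List.any_cons] at *
    rw [this]
    congr 1
    simp [eq_comm]

theorem pvInsert_not_contains (d : PySem.Dict String Int) (a : String) (v : Int)
    (h : d.contains a = false) : d.insert a v = ⟨d.items ++ [(a, v)]⟩ := by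
  simp [PySem.Dict.insert, h]

-- A's loop, from a table that is d0 extended by the rows for `seen` starting at p0,
-- appends exactly the rows for pvCollect and advances the counter by their number.
theorem pvA_fold (d0 : PySem.Dict String Int) (lines : List String) :
    ∀ (seen : List String) (p0 : Int),
      lines.foldl
        (fun (st : PySem.Dict String Int × Int) line =>
          if PySem.Str.startswith line "@" then
            let a_instruction := PySem.Str.slice line (some 1) none
            if PySem.Str.strIsdigit a_instruction = false ∧ st.1.contains a_instruction = false then
              (st.1.insert a_instruction st.2, st.2 + 1)
            else st
          else st)
        (⟨d0.items ++ pvEnt seen p0⟩, p0 + seen.length)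
      = (⟨d0.items ++ pvEnt (seen ++ pvCollect d0 lines seen) p0⟩,
         p0 + (seen ++ pvCollect d0 lines seen).length) := by
  induction lines with
  | nil => intro seen p0; simp [pvCollect]
  | cons line ls ih =>
    intro seen p0
    simp only [List.foldl_cons]
    by_cases hs : PySem.Str.startswith line "@"
    · simp only [hs, if_true]
      set a := PySem.Str.slice line (some 1) none with ha
      have hc : (⟨d0.items ++ pvEnt seen p0⟩ : PySem.Dict String Int).contains a
          = (d0.contains a || PySem.Set.contains seen a) := by
        rw [pvContains_append, pvContains_ent]
      by_cases hcond : PySem.Str.strIsdigit a = false ∧ d0.contains a = false ∧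
          PySem.Set.contains seen a = false
      · have hbr : PySem.Str.strIsdigit a = false ∧
            (⟨d0.items ++ pvEnt seen p0⟩ : PySem.Dict String Int).contains a = false := by
          refine ⟨hcond.1, ?_⟩
          rw [hc, hcond.2.1, hcond.2.2]
          rfl
        rw [if_pos hbr]
        have hins : (⟨d0.items ++ pvEnt seen p0⟩ : PySem.Dict String Int).insert a (p0 + seen.length)
            = ⟨d0.items ++ pvEnt (seen ++ [a]) p0⟩ := by
          rw [pvInsert_not_contains _ _ _ hbr.2]
          simp [pvEnt_append]
        rw [hins]
        have hlen : p0 + (seen.length : Int) + 1 = p0 + (((seen ++ [a]).length : Nat) : Int) := by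
          simp
          ring
        rw [hlen, ih (seen ++ [a]) p0]
        simp only [pvCollect, ← ha]
        rw [if_pos hs, if_pos hcond]
        simp
      · have hbr : ¬ (PySem.Str.strIsdigit a = false ∧
            (⟨d0.items ++ pvEnt seen p0⟩ : PySem.Dict String Int).contains a = false) := by
          rw [hc]
          intro ⟨h1, h2⟩
          rcases Bool.or_eq_false_iff.mp h2 with ⟨h3, h4⟩
          exact hcond ⟨h1, h3, h4⟩
        rw [if_neg hbr]
        rw [ih seen p0]
        simp only [pvCollect, ← ha]
        rw [if_pos hs, if_neg hcond]
    · simp only [hs, if_false, Bool.false_eq_true]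
      rw [ih seen p0]
      simp only [pvCollect]
      rw [if_neg (by simpa using hs)]

-- B's first pass keeps its seen set equal to its output list and produces pvCollect.
theorem pvB_first (d0 : PySem.Dict String Int) (lines : List String) :
    ∀ (vs : List String),
      lines.foldl
        (fun (acc : PySem.Set String × List String) line =>
          if PySem.Str.startswith line "@" then
            let name := PySem.Str.slice line (some 1) none
            if PySem.Str.strIsdigit name = false ∧ d0.contains name = false ∧
                PySem.Set.contains acc.1 name = false then
              (PySem.Set.add acc.1 name, acc.2 ++ [name])
            else acc
          else acc)
        (vs, vs)
      = (vs ++ pvCollect d0 lines vs, vs ++ pvCollect d0 lines vs) := by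
  induction lines with
  | nil => intro vs; simp [pvCollect]
  | cons line ls ih =>
    intro vs
    simp only [List.foldl_cons]
    by_cases hs : PySem.Str.startswith line "@"
    · simp only [hs, if_true]
      set a := PySem.Str.slice line (some 1) none with ha
      by_cases hcond : PySem.Str.strIsdigit a = false ∧ d0.contains a = false ∧
          PySem.Set.contains vs a = false
      · rw [if_pos hcond]
        have hadd : PySem.Set.add vs a = vs ++ [a] := by
          simp [PySem.Set.add, PySem.Set.contains]
          exact (pvSetContains_false vs a).mp hcond.2.2
        rw [hadd, ih (vs ++ [a])]
        simp only [pvCollect, ← ha]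
        rw [if_pos hs, if_pos hcond]
        simp
      · rw [if_neg hcond, ih vs]
        simp only [pvCollect, ← ha]
        rw [if_pos hs, if_neg hcond]
    · simp only [hs, if_false, Bool.false_eq_true]
      rw [ih vs]
      simp only [pvCollect]
      rw [if_neg (by simpa using hs)]

-- every name pvCollect emits is absent from d0 and from the seen prefix, and the whole list is Nodup
theorem pvCollect_not_in_d0 (d0 : PySem.Dict String Int) (lines : List String) :
    ∀ seen, ∀ a ∈ pvCollect d0 lines seen, d0.contains a = false := by
  induction lines with
  | nil => intro seen a h; simp [pvCollect] at h
  | cons line ls ih =>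
    intro seen a h
    by_cases hs : PySem.Str.startswith line "@"
    · simp only [pvCollect, hs, if_true] at h
      set b := PySem.Str.slice line (some 1) none with hb
      by_cases hcond : PySem.Str.strIsdigit b = false ∧ d0.contains b = false ∧
          PySem.Set.contains seen b = false
      · rw [if_pos hcond] at h
        rcases List.mem_cons.mp h with h1 | h2
        · rw [h1]; exact hcond.2.1
        · exact ih _ _ h2
      · rw [if_neg hcond] at h; exact ih _ _ h
    · simp only [pvCollect, hs, if_false, Bool.false_eq_true] at h
      exact ih _ _ h

theorem pvCollect_nodup (d0 : PySem.Dict String Int) (lines : List String) :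
    ∀ seen, seen.Nodup → (seen ++ pvCollect d0 lines seen).Nodup := by
  induction lines with
  | nil => intro seen h; simpa [pvCollect]
  | cons line ls ih =>
    intro seen hnd
    by_cases hs : PySem.Str.startswith line "@"
    · simp only [pvCollect, hs, if_true]
      set b := PySem.Str.slice line (some 1) none with hb
      by_cases hcond : PySem.Str.strIsdigit b = false ∧ d0.contains b = false ∧
          PySem.Set.contains seen b = false
      · rw [if_pos hcond]
        have hnotmem : b ∉ seen := (pvSetContains_false seen b).mp hcond.2.2
        have : ((seen ++ [b]) ++ pvCollect d0 ls (seen ++ [b])).Nodup :=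
          ih (seen ++ [b]) (by
            rw [List.nodup_append]
            refine ⟨hnd, List.nodup_singleton b, ?_⟩
            intro x hx y hy
            rw [List.mem_singleton] at hy
            subst hy
            exact fun hxy => hnotmem (hxy ▸ hx))
        simpa using this
      · rw [if_neg hcond]; exact ih seen hnd
    · simp only [pvCollect, hs, if_false, Bool.false_eq_true]
      exact ih seen hnd

-- B's second pass: inserting fresh distinct keys appends the pvEnt block.
theorem pvB_second (vars : List String) :
    ∀ (d : PySem.Dict String Int) (p0 : Int),
      (∀ a ∈ vars, d.contains a = false) → vars.Nodup →
      ((PySem.List.enumerate vars p0).foldl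
          (fun (d : PySem.Dict String Int) p => d.insert p.2 p.1) d).items
        = d.items ++ pvEnt vars p0 := by
  induction vars with
  | nil => intro d p0 _ _; simp [PySem.List.enumerate, pvEnt]
  | cons v vs ih =>
    intro d p0 hab hnd
    rw [PySem.List.enumerate_cons]
    simp only [List.foldl_cons]
    rw [pvInsert_not_contains d v p0 (hab v (by simp))]
    have hab' : ∀ a ∈ vs, (⟨d.items ++ [(v, p0)]⟩ : PySem.Dict String Int).contains a = false := by
      intro a ha
      have h1 : d.contains a = false := hab a (by simp [ha])
      have h2 : a ≠ v := by
        intro h; rw [h] at ha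
        exact (List.nodup_cons.mp hnd).1 ha
      simp only [PySem.Dict.contains, List.any_append, List.any_cons, List.any_nil,
        Bool.or_eq_false_iff]
      constructor
      · simpa [PySem.Dict.contains] using h1
      · simp [Ne.symm h2]
    rw [ih _ (p0 + 1) hab' (List.nodup_cons.mp hnd).2]
    simp [pvEnt]

-- ===== VERDICT (by name: the statement is the Claim_ definition above) =====
theorem handle_variables_spec : Claim_equal_handle_variables := by
  intro lines symbol_table _
  unfold Spec_handle_variables handle_variables handle_variables_alt
  set d0 : PySem.Dict String Int := ⟨symbol_table⟩ with hd0
  have hA := pvA_fold d0 lines [] 16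
  simp only [pvEnt, List.nil_append, List.length_nil, Nat.cast_zero, add_zero,
    List.append_nil] at hA
  have hB := pvB_first d0 lines []
  simp only [List.nil_append] at hB
  have hnd : (pvCollect d0 lines []).Nodup := by
    have := pvCollect_nodup d0 lines [] (by simp)
    simpa using this
  have hab : ∀ a ∈ pvCollect d0 lines [], d0.contains a = false :=
    fun a ha => pvCollect_not_in_d0 d0 lines [] a ha
  have h2 := pvB_second (pvCollect d0 lines []) d0 16 hab hnd
  rw [hA]
  simp only [PySem.Set.empty, hB, h2]
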